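-- pv_equiv track=rewrite | github.com/jfrisancho/py-jaydebeapi-example | payloads/managers/validation_manager.py | _is_compatible_utility_flow
-- ===== SOURCE A (Python) =====
-- def _is_compatible_utility_flow(from_utility: int, to_utility: int) -> bool:
--     """Check if utilities are compatible for flow."""
--
--     # Define utility compatibility groups
--     compatible_groups = [
--         [1, 2, 3, 4],      # Water systems
--         [10, 11, 12, 13],  # Gas systems
--         [20, 21, 22],      # Electrical systems
--         [30, 31, 32],      # HVAC systems
--     ]
--
--     # Check if both utilities are in the same compatibility group
--     for group in compatible_groups:
--         if from_utility in group and to_utility in group: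
--             return True
--
--     return False
-- ===== SOURCE B (Python) =====
-- # Precompute a flat utility-id -> group-id map once; membership loops disappear.
-- _UTILITY_GROUP = {}
-- for _gid, _members in enumerate([
--     [1, 2, 3, 4],      # Water systems
--     [10, 11, 12, 13],  # Gas systems
--     [20, 21, 22],      # Electrical systems
--     [30, 31, 32],      # HVAC systems
-- ]):
--     for _u in _members:
--         _UTILITY_GROUP[_u] = _gid
--
--
-- def _is_compatible_utility_flow(from_utility: int, to_utility: int) -> bool:
--     """Check if utilities are compatible for flow."""
--     g = _UTILITY_GROUP.get(from_utility)
--     return g is not None and _UTILITY_GROUP.get(to_utility) == g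
-- ===== Notes on version B (the rewrite author's own statement) =====
-- stated objective: idiomatic
-- what changed: Replaced the per-call loop over compatibility groups with a module-level dict mapping each utility id to its group id; the function is now two lookups and one guarded comparison.
import Mathlib
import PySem

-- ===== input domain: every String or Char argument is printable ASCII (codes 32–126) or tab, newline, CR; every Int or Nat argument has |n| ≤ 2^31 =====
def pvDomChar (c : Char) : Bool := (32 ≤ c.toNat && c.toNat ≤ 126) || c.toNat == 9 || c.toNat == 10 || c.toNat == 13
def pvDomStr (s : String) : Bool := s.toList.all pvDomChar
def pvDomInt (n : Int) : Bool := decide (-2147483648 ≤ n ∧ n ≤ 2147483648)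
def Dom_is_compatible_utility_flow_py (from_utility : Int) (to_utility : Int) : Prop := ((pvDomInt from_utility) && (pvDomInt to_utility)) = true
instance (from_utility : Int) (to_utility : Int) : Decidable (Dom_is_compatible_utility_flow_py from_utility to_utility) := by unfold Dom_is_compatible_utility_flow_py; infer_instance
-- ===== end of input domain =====

-- B builds a flat utility→group dict once; the function is two lookups and one comparison (idiomatic).

-- ===== PORT A =====
-- loop over groups with early `return True` on the first group containing both = List.any
def is_compatible_utility_flow_py (from_utility : Int) (to_utility : Int) : Bool :=
  let compatible_groups : List (List Int) := [[1, 2, 3, 4], [10, 11, 12, 13], [20, 21, 22], [30, 31, 32]]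
  compatible_groups.any (fun group => group.contains from_utility && group.contains to_utility)

-- ===== PORT B =====
-- module-level dict built by the enumerate/insert loops of Source B
def pvUtilityGroup : PySem.Dict Int Int :=
  (PySem.List.enumerate ([[1, 2, 3, 4], [10, 11, 12, 13], [20, 21, 22], [30, 31, 32]] : List (List Int))).foldl
    (fun d p => p.2.foldl (fun d u => d.insert u p.1) d) PySem.Dict.empty

def is_compatible_utility_flow_py_alt (from_utility : Int) (to_utility : Int) : Bool :=
  match pvUtilityGroup.get? from_utility with
  | none => false
  | some g => pvUtilityGroup.get? to_utility == some g

-- ===== PRECONDITION & SPEC =====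
def Spec_is_compatible_utility_flow_py (from_utility : Int) (to_utility : Int) (out : Bool) : Prop := out = is_compatible_utility_flow_py_alt from_utility to_utility
instance (from_utility : Int) (to_utility : Int) (out : Bool) : Decidable (Spec_is_compatible_utility_flow_py from_utility to_utility out) := by unfold Spec_is_compatible_utility_flow_py; infer_instance

-- ===== CLAIM (what is proved, stated in full; the proofs are below) =====
def Claim_equal_is_compatible_utility_flow_py : Prop := ∀ (from_utility : Int) (to_utility : Int), Dom_is_compatible_utility_flow_py from_utility to_utility → Spec_is_compatible_utility_flow_py from_utility to_utility (is_compatible_utility_flow_py from_utility to_utility)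

-- ===== LEMMAS AND PROOFS =====

lemma pvUtilityGroup_get? (u : Int) :
    pvUtilityGroup.get? u =
      if u = 1 ∨ u = 2 ∨ u = 3 ∨ u = 4 then some 0
      else if u = 10 ∨ u = 11 ∨ u = 12 ∨ u = 13 then some 1
      else if u = 20 ∨ u = 21 ∨ u = 22 then some 2
      else if u = 30 ∨ u = 31 ∨ u = 32 then some 3
      else none := by
  by_cases h0 : u = (1 : Int)
  · subst h0; decide
  by_cases h1 : u = (2 : Int)
  · subst h1; decide
  by_cases h2 : u = (3 : Int)
  · subst h2; decide
  by_cases h3 : u = (4 : Int)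
  · subst h3; decide
  by_cases h4 : u = (10 : Int)
  · subst h4; decide
  by_cases h5 : u = (11 : Int)
  · subst h5; decide
  by_cases h6 : u = (12 : Int)
  · subst h6; decide
  by_cases h7 : u = (13 : Int)
  · subst h7; decide
  by_cases h8 : u = (20 : Int)
  · subst h8; decide
  by_cases h9 : u = (21 : Int)
  · subst h9; decide
  by_cases h10 : u = (22 : Int)
  · subst h10; decide
  by_cases h11 : u = (30 : Int)
  · subst h11; decide
  by_cases h12 : u = (31 : Int)
  · subst h12; decide
  by_cases h13 : u = (32 : Int)
  · subst h13; decide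
  have e0 : ((1 : Int) == u) = false := beq_eq_false_iff_ne.mpr (Ne.symm h0)
  have e1 : ((2 : Int) == u) = false := beq_eq_false_iff_ne.mpr (Ne.symm h1)
  have e2 : ((3 : Int) == u) = false := beq_eq_false_iff_ne.mpr (Ne.symm h2)
  have e3 : ((4 : Int) == u) = false := beq_eq_false_iff_ne.mpr (Ne.symm h3)
  have e4 : ((10 : Int) == u) = false := beq_eq_false_iff_ne.mpr (Ne.symm h4)
  have e5 : ((11 : Int) == u) = false := beq_eq_false_iff_ne.mpr (Ne.symm h5)
  have e6 : ((12 : Int) == u) = false := beq_eq_false_iff_ne.mpr (Ne.symm h6)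
  have e7 : ((13 : Int) == u) = false := beq_eq_false_iff_ne.mpr (Ne.symm h7)
  have e8 : ((20 : Int) == u) = false := beq_eq_false_iff_ne.mpr (Ne.symm h8)
  have e9 : ((21 : Int) == u) = false := beq_eq_false_iff_ne.mpr (Ne.symm h9)
  have e10 : ((22 : Int) == u) = false := beq_eq_false_iff_ne.mpr (Ne.symm h10)
  have e11 : ((30 : Int) == u) = false := beq_eq_false_iff_ne.mpr (Ne.symm h11)
  have e12 : ((31 : Int) == u) = false := beq_eq_false_iff_ne.mpr (Ne.symm h12)
  have e13 : ((32 : Int) == u) = false := beq_eq_false_iff_ne.mpr (Ne.symm h13)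
  simp [pvUtilityGroup, PySem.List.enumerate, PySem.Dict.insert, PySem.Dict.get?, PySem.Dict.empty, List.find?, e0, e1, e2, e3, e4, e5, e6, e7, e8, e9, e10, e11, e12, e13]
  simp [h0, h1, h2, h3, h4, h5, h6, h7, h8, h9, h10, h11, h12, h13]

-- ===== VERDICT (by name: the statement is the Claim_ definition above) =====
theorem is_compatible_utility_flow_py_spec : Claim_equal_is_compatible_utility_flow_py := by
  intro f t _
  unfold Spec_is_compatible_utility_flow_py is_compatible_utility_flow_py is_compatible_utility_flow_py_alt
  rw [Bool.eq_iff_iff]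
  simp only [pvUtilityGroup_get?]
  split_ifs <;> simp_all <;> omega
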